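-- pv_equiv track=rewrite | github.com/mihail-nikolov/hackBG | week0/simple_problems/23_it_nan.py | it_nan
-- ===== SOURCE A (Python) =====
-- def it_nan(string):
--     string = string.lower()
--     not_str = "not a "
--     nan_str = "nan"
--     last_3 = string[-3:]
--     count1 = string.count(not_str)
--     count2 = string.count(nan_str)
--     if count1 == 0 or count2 != 1 or last_3 != nan_str:
--         return False
--     else:
--         len_str = len(string)
--         string = string.replace(nan_str, "")
--         for i in range(len_str):
--             string = string.replace(not_str, "")
--         if len(string) != 0:
--             return False
--     return count1
-- ===== SOURCE B (Python) =====
-- def it_nan(string):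
--     s = string.lower()
--     not_str = "not a "
--     nan_str = "nan"
--     count1 = s.count(not_str)
--     count2 = s.count(nan_str)
--     if count1 == 0 or count2 != 1 or s[-3:] != nan_str:
--         return False
--     rest = s.replace(nan_str, "")
--     stack = []
--     for ch in rest:
--         stack.append(ch)
--         if stack[-6:] == list(not_str):
--             del stack[-6:]
--     return count1 if not stack else False
-- ===== Notes on version B (the rewrite author's own statement) =====
-- stated objective: alternative
-- what changed: A's loop of len(s) whole-string replace passes deleting the pattern is replaced by a single left-to-right pass with an explicit character stack that pops whenever its top six characters spell the pattern; validation and the returned count are unchanged.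
import Mathlib
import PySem

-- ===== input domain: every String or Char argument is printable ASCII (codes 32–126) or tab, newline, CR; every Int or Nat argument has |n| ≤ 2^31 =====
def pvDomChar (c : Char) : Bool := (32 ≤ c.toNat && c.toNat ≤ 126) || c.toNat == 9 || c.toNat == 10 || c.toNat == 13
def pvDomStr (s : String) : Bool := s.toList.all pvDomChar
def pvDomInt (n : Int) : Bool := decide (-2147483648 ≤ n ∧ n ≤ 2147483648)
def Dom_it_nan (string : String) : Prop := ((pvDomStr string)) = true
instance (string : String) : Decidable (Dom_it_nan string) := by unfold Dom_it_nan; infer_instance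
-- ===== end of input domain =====

-- B replaces A's loop of whole-string replace passes (deleting the pattern) by one
-- left-to-right pass with an explicit character stack (objective: alternative).
-- Python A returns the int count1 (always ≥ 1, truthy) on success and False otherwise;
-- both ports render that truth value as Bool (true for count1, false for False).

-- ===== PORT A =====
def it_nan (string : String) : Bool :=
  let s := PySem.Str.lower string
  let not_str := "not a "
  let nan_str := "nan"
  let last_3 := PySem.Str.slice s (some (-3)) none
  let count1 := PySem.Str.count s not_str
  let count2 := PySem.Str.count s nan_str
  if count1 = 0 ∨ count2 ≠ 1 ∨ last_3 ≠ nan_str then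
    false
  else
    let len_str := PySem.Str.len s
    let s1 := PySem.Str.replace s nan_str ""
    let s2 := (PySem.List.pyRange 0 len_str 1).foldl
        (fun st _ => PySem.Str.replace st not_str "") s1
    if PySem.Str.len s2 ≠ 0 then false
    else true  -- 'return count1' with count1 ≥ 1: truthy int → true

-- ===== PORT B =====
-- stack.append(ch); if stack[-6:] == list("not a "): del stack[-6:]
def altStep (st : List Char) (c : Char) : List Char :=
  let st' := st ++ [c]
  if PySem.List.slice st' (some (-6)) none = "not a ".toList then
    st'.take (st'.length - 6)
  else st'

def it_nan_alt (string : String) : Bool :=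
  let s := PySem.Str.lower string
  let not_str := "not a "
  let nan_str := "nan"
  let count1 := PySem.Str.count s not_str
  let count2 := PySem.Str.count s nan_str
  if count1 = 0 ∨ count2 ≠ 1 ∨ PySem.Str.slice s (some (-3)) none ≠ nan_str then
    false
  else
    let rest := PySem.Str.replace s nan_str ""
    let stack := rest.toList.foldl altStep []
    if stack = [] then true else false  -- 'count1 if not stack else False' as Bool

-- ===== PRECONDITION & SPEC =====
def Spec_it_nan (string : String) (out : Bool) : Prop := out = it_nan_alt string
instance (string : String) (out : Bool) : Decidable (Spec_it_nan string out) := by unfold Spec_it_nan; infer_instance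

-- ===== CLAIM (what is proved, stated in full; the proofs are below) =====
def Claim_equal_it_nan : Prop := ∀ (string : String), Dom_it_nan string → Spec_it_nan string (it_nan string)

-- ===== LEMMAS AND PROOFS =====

-- the stack step on the REVERSED stack (top of stack first)
def rstep (r : List Char) (c : Char) : List Char :=
  if (c :: r).take 6 = [' ', 'a', ' ', 't', 'o', 'n'] then (c :: r).drop 6 else c :: r

-- A's replace loop as a pure iteration count
def iterRep : Nat → List Char → List Char
  | 0, l => l
  | k + 1, l => iterRep k (PySem.Chars.replace l "not a ".toList [])

theorem hw_toList : "not a ".toList = ['n', 'o', 't', ' ', 'a', ' '] := rfl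

-- feeding the whole word "not a " to the stack pops it again: net identity
theorem eatW (r : List Char) : "not a ".toList.foldl rstep r = r := by
  simp [hw_toList, rstep, List.foldl]

-- the reversed-stack fold is invariant under Chars.replace.go (deleting "not a " occurrences)
theorem go_fold (fuel : Nat) : ∀ (l acc r : List Char),
    (PySem.Chars.replace.go "not a ".toList [] fuel l acc).foldl rstep r
      = l.foldl rstep (acc.reverse.foldl rstep r) := by
  induction fuel with
  | zero =>
    intro l acc r
    rw [PySem.Chars.replace.go.eq_def]
    simp [List.foldl_append]
  | succ f ih =>
    intro l acc r
    rw [PySem.Chars.replace.go.eq_def]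
    match l with
    | [] => simp
    | c :: t =>
      by_cases hp : "not a ".toList.isPrefixOf (c :: t) = true
      · simp only [hp, if_true]
        rw [ih]
        obtain ⟨q, hq⟩ := List.isPrefixOf_iff_prefix.mp hp
        rw [← hq, List.foldl_append, eatW, List.drop_left]
        simp
      · simp only [hp, Bool.false_eq_true, if_false]
        rw [ih]
        simp [List.foldl_append]

theorem replace_fold (l r : List Char) :
    (PySem.Chars.replace l "not a ".toList []).foldl rstep r = l.foldl rstep r := by
  rw [PySem.Chars.replace]
  simp only [hw_toList, List.isEmpty_cons, Bool.false_eq_true, if_false]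
  rw [← hw_toList, go_fold]
  simp

-- go with empty replacement never lengthens
theorem len_go (pat : List Char) (fuel : Nat) : ∀ (l acc : List Char),
    (PySem.Chars.replace.go pat [] fuel l acc).length ≤ acc.length + l.length := by
  induction fuel with
  | zero =>
    intro l acc
    rw [PySem.Chars.replace.go.eq_def]
    simp [Nat.add_comm]
  | succ f ih =>
    intro l acc
    rw [PySem.Chars.replace.go.eq_def]
    match l with
    | [] => simp
    | c :: t =>
      by_cases hp : pat.isPrefixOf (c :: t) = true
      · simp only [hp, if_true]
        calc (PySem.Chars.replace.go pat [] f ((c :: t).drop pat.length) ([].reverse ++ acc)).length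
            ≤ ([].reverse ++ acc : List Char).length + ((c :: t).drop pat.length).length := ih _ _
          _ ≤ acc.length + (c :: t).length := by simp only [List.reverse_nil, List.nil_append, List.length_drop, List.length_cons]; omega
      · simp only [hp, Bool.false_eq_true, if_false]
        calc (PySem.Chars.replace.go pat [] f t (c :: acc)).length
            ≤ (c :: acc).length + t.length := ih _ _
          _ = acc.length + (c :: t).length := by simp; omega

theorem replace_len (l pat : List Char) (hp : pat ≠ []) :
    (PySem.Chars.replace l pat []).length ≤ l.length := by
  rw [PySem.Chars.replace]
  have : pat.isEmpty = false := by simpa [List.isEmpty_iff] using hp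
  simp only [this, Bool.false_eq_true, if_false]
  simpa using len_go pat l.length l []

-- an occurrence of "not a " makes go shrink by at least 6
theorem occ_shrink (fuel : Nat) : ∀ (l acc : List Char), l.length ≤ fuel →
    "not a ".toList <:+: l →
    (PySem.Chars.replace.go "not a ".toList [] fuel l acc).length + 6 ≤ acc.length + l.length := by
  induction fuel with
  | zero =>
    intro l acc hl hocc
    have : l = [] := List.eq_nil_of_length_eq_zero (Nat.le_zero.mp hl)
    subst this
    simp [hw_toList] at hocc
  | succ f ih =>
    intro l acc hl hocc
    rw [PySem.Chars.replace.go.eq_def]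
    match l with
    | [] => simp [hw_toList] at hocc
    | c :: t =>
      by_cases hp : "not a ".toList.isPrefixOf (c :: t) = true
      · simp only [hp, if_true]
        have hpre : "not a ".toList <+: (c :: t) := List.isPrefixOf_iff_prefix.mp hp
        have h6 : 6 ≤ (c :: t).length := by
          have := hpre.length_le; simpa [hw_toList] using this
        calc (PySem.Chars.replace.go "not a ".toList [] f ((c :: t).drop "not a ".toList.length) ([].reverse ++ acc)).length + 6
            ≤ ([].reverse ++ acc : List Char).length + ((c :: t).drop "not a ".toList.length).length + 6 := by
              have := len_go "not a ".toList f ((c :: t).drop "not a ".toList.length) ([].reverse ++ acc)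
              omega
          _ ≤ acc.length + (c :: t).length := by
              simp only [List.reverse_nil, List.nil_append, List.length_drop, hw_toList, List.length_cons]
              simp at h6 ⊢; omega
      · simp only [hp, Bool.false_eq_true, if_false]
        have hocc' : "not a ".toList <:+: t := by
          rcases List.infix_cons_iff.mp hocc with h | h
          · exact absurd (List.isPrefixOf_iff_prefix.mpr h) hp
          · exact h
        have hl' : t.length ≤ f := by simpa using Nat.lt_succ_iff.mp (by simpa using hl)
        calc (PySem.Chars.replace.go "not a ".toList [] f t (c :: acc)).length + 6
            ≤ (c :: acc).length + t.length := ih t (c :: acc) hl' hocc'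
          _ ≤ acc.length + (c :: t).length := by simp; omega

-- no occurrence: go (hence replace) is the identity
theorem noocc_go (fuel : Nat) : ∀ (l acc : List Char), ¬ "not a ".toList <:+: l →
    PySem.Chars.replace.go "not a ".toList [] fuel l acc = acc.reverse ++ l := by
  induction fuel with
  | zero => intro l acc _; rw [PySem.Chars.replace.go.eq_def]
  | succ f ih =>
    intro l acc hocc
    rw [PySem.Chars.replace.go.eq_def]
    match l with
    | [] => simp
    | c :: t =>
      by_cases hp : "not a ".toList.isPrefixOf (c :: t) = true
      · exact absurd (List.infix_cons_iff.mpr (Or.inl (List.isPrefixOf_iff_prefix.mp hp))) hocc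
      · simp only [hp, Bool.false_eq_true, if_false]
        rw [ih t (c :: acc) (fun h => hocc (List.infix_cons_iff.mpr (Or.inr h)))]
        simp

theorem replace_dichotomy (l : List Char) :
    PySem.Chars.replace l "not a ".toList [] = l ∨
    (PySem.Chars.replace l "not a ".toList []).length + 6 ≤ l.length := by
  by_cases hocc : "not a ".toList <:+: l
  · right
    rw [PySem.Chars.replace]
    simp only [hw_toList, List.isEmpty_cons, Bool.false_eq_true, if_false]
    rw [← hw_toList]
    simpa using occ_shrink l.length l [] le_rfl hocc
  · left
    rw [PySem.Chars.replace]
    simp only [hw_toList, List.isEmpty_cons, Bool.false_eq_true, if_false]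
    rw [← hw_toList, noocc_go l.length l [] hocc]
    simp

theorem fix_noocc (l : List Char) (h : PySem.Chars.replace l "not a ".toList [] = l) :
    ¬ "not a ".toList <:+: l := by
  intro hocc
  have h2 : (PySem.Chars.replace l "not a ".toList []).length + 6 ≤ l.length := by
    rw [PySem.Chars.replace]
    simp only [hw_toList, List.isEmpty_cons, Bool.false_eq_true, if_false]
    rw [← hw_toList]
    simpa using occ_shrink l.length l [] le_rfl hocc
  rw [h] at h2
  omega

theorem fix_stays (k : Nat) (l : List Char) (h : PySem.Chars.replace l "not a ".toList [] = l) :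
    iterRep k l = l := by
  induction k with
  | zero => rfl
  | succ n ih =>
    rw [show iterRep (n + 1) l = iterRep n (PySem.Chars.replace l "not a ".toList []) from rfl, h]
    exact ih

theorem iter_fix (k : Nat) : ∀ (l : List Char), l.length ≤ 6 * k →
    PySem.Chars.replace (iterRep k l) "not a ".toList [] = iterRep k l := by
  induction k with
  | zero =>
    intro l hl
    have : l = [] := List.eq_nil_of_length_eq_zero (by omega)
    subst this
    rfl
  | succ n ih =>
    intro l hl
    rcases replace_dichotomy l with h | h
    · rw [show iterRep (n + 1) l = iterRep n (PySem.Chars.replace l "not a ".toList []) from rfl,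
        h, fix_stays n l h, h]
    · rw [show iterRep (n + 1) l = iterRep n (PySem.Chars.replace l "not a ".toList []) from rfl]
      exact ih _ (by omega)

theorem iter_fold (k : Nat) : ∀ (l r : List Char),
    (iterRep k l).foldl rstep r = l.foldl rstep r := by
  induction k with
  | zero => intro l r; rfl
  | succ n ih => intro l r; rw [show iterRep (n + 1) l = iterRep n (PySem.Chars.replace l "not a ".toList []) from rfl, ih, replace_fold]

-- on an occurrence-free list the stack never pops
theorem noocc_fold (q : List Char) : ∀ (p : List Char), ¬ "not a ".toList <:+: (p ++ q) →
    q.foldl rstep p.reverse = (p ++ q).reverse := by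
  induction q with
  | nil => intro p _; simp
  | cons c t ih =>
    intro p hocc
    have hcond : ¬ (c :: p.reverse).take 6 = [' ', 'a', ' ', 't', 'o', 'n'] := by
      intro hc
      have hpre : ([' ', 'a', ' ', 't', 'o', 'n'] : List Char) <+: (c :: p.reverse) := by
        rw [← hc]; exact List.take_prefix 6 _
      have hsuf : "not a ".toList <:+ (p ++ [c]) := by
        rw [show ((p ++ [c]) : List Char) = (c :: p.reverse).reverse by simp,
          show ("not a ".toList : List Char) = ([' ', 'a', ' ', 't', 'o', 'n'] : List Char).reverse from rfl]
        exact List.reverse_suffix.mpr hpre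
      apply hocc
      rw [List.append_cons]
      exact hsuf.isInfix.trans (List.prefix_append _ _).isInfix
    have hstep : rstep p.reverse c = (p ++ [c]).reverse := by
      rw [rstep, if_neg hcond]; simp
    rw [List.foldl_cons, hstep, ih (p ++ [c]) (by rw [← List.append_cons]; exact hocc),
      ← List.append_cons]

-- B's end-of-list stack step is the reversed-stack step
theorem altStep_eq (st : List Char) (c : Char) :
    altStep st c = (rstep st.reverse c).reverse := by
  have hrev : (st ++ [c]).reverse = c :: st.reverse := by simp
  have hslice : PySem.List.slice (st ++ [c]) (some (-6)) none
      = ((st ++ [c]).reverse.take 6).reverse := by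
    rw [PySem.List.slice_from_neg_ofNat (st ++ [c]) 6 (by norm_num)]
    rw [← List.rtake, List.rtake_eq_reverse_take_reverse]
  have hdrop : (st ++ [c]).take ((st ++ [c]).length - 6)
      = ((st ++ [c]).reverse.drop 6).reverse := by
    rw [← List.rdrop, List.rdrop_eq_reverse_drop_reverse]
  simp only [altStep, rstep]
  by_cases hc : (c :: st.reverse).take 6 = [' ', 'a', ' ', 't', 'o', 'n']
  · have hsl : PySem.List.slice (st ++ [c]) (some (-6)) none = "not a ".toList := by
      rw [hslice, hrev, hc]; rfl
    rw [if_pos hsl, if_pos hc, hdrop, hrev]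
  · have hsl : ¬ PySem.List.slice (st ++ [c]) (some (-6)) none = "not a ".toList := by
      rw [hslice, hrev]
      intro h
      exact hc (by simpa using congrArg List.reverse h)
    rw [if_neg hsl, if_neg hc, ← hrev, List.reverse_reverse]

theorem foldl_altStep (l : List Char) : ∀ (st : List Char),
    l.foldl altStep st = (l.foldl rstep st.reverse).reverse := by
  induction l with
  | nil => intro st; simp
  | cons c t ih =>
    intro st
    rw [List.foldl_cons, List.foldl_cons, altStep_eq, ih, List.reverse_reverse]

-- string-level loop to list-level iteration
theorem toList_loop (xs : List Int) : ∀ (s : String),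
    (xs.foldl (fun st _ => PySem.Str.replace st "not a " "") s).toList
      = iterRep xs.length s.toList := by
  induction xs with
  | nil => intro s; rfl
  | cons x t ih =>
    intro s
    rw [List.foldl_cons, ih]
    rw [show iterRep (x :: t).length s.toList
        = iterRep t.length (PySem.Chars.replace s.toList "not a ".toList []) from rfl]
    congr 1
    simp [PySem.Str.toList_replace]

-- ===== VERDICT (by name: the statement is the Claim_ definition above) =====
set_option maxHeartbeats 1000000 in
theorem it_nan_spec : Claim_equal_it_nan := by
  intro string _
  unfold Spec_it_nan it_nan it_nan_alt
  set s := PySem.Str.lower string with hs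
  by_cases hc : PySem.Str.count s "not a " = 0 ∨ PySem.Str.count s "nan" ≠ 1 ∨
      PySem.Str.slice s (some (-3)) none ≠ "nan"
  · simp only [hc, if_true]
  · simp only [hc, if_false]
    -- both sides in the success branch
    set rest := PySem.Str.replace s "nan" "" with hrest
    have hlenrest : rest.toList.length ≤ s.toList.length := by
      rw [hrest]
      rw [PySem.Str.toList_replace]
      exact replace_len s.toList "nan".toList (by simp)
    -- A's final string
    set n := (PySem.List.pyRange 0 (PySem.Str.len s) 1).length with hn
    have hfin : ((PySem.List.pyRange 0 (PySem.Str.len s) 1).foldl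
        (fun st _ => PySem.Str.replace st "not a " "") rest).toList = iterRep n rest.toList :=
      toList_loop _ rest
    have hnlen : s.toList.length ≤ 6 * n := by
      have : PySem.Str.len s = (s.toList.length : Int) := PySem.Str.len_eq s
      rw [hn, this, PySem.List.pyRange_zero_natCast]
      simp
      omega
    have hfix : PySem.Chars.replace (iterRep n rest.toList) "not a ".toList []
        = iterRep n rest.toList := iter_fix n rest.toList (by omega)
    have hstack : rest.toList.foldl altStep [] = (rest.toList.foldl rstep []).reverse := by
      rw [foldl_altStep]
      rfl
    have hchain : (iterRep n rest.toList).foldl rstep [] = rest.toList.foldl rstep [] :=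
      iter_fold n rest.toList []
    by_cases hemp : iterRep n rest.toList = []
    · -- A returns true; show the stack is empty too
      have hA : PySem.Str.len ((PySem.List.pyRange 0 (PySem.Str.len s) 1).foldl
          (fun st _ => PySem.Str.replace st "not a " "") rest) = 0 := by
        rw [PySem.Str.len_eq, hfin, hemp]; rfl
      have hB : rest.toList.foldl altStep [] = [] := by
        rw [hstack, ← hchain, hemp]
        rfl
      rw [if_neg (fun h => h hA), if_pos hB]
    · -- A returns false; show the stack is nonempty
      have hA : PySem.Str.len ((PySem.List.pyRange 0 (PySem.Str.len s) 1).foldl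
          (fun st _ => PySem.Str.replace st "not a " "") rest) ≠ 0 := by
        rw [PySem.Str.len_eq, hfin]
        simpa using hemp
      have hnoocc : ¬ "not a ".toList <:+: iterRep n rest.toList := fix_noocc _ hfix
      have hnf : (iterRep n rest.toList).foldl rstep [] = (iterRep n rest.toList).reverse := by
        have := noocc_fold (iterRep n rest.toList) [] (by simpa using hnoocc)
        simpa using this
      have hB : rest.toList.foldl altStep [] ≠ [] := by
        rw [hstack, ← hchain, hnf]
        simpa using hemp
      rw [if_pos hA, if_neg hB]
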